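-- pv_equiv track=rewrite | github.com/VladiMihtarski/mytestprogram | Party_Profit.py | calculate_coins_per_companion
-- ===== SOURCE A (Python) =====
-- def calculate_coins_per_companion(number_of_companions, days):
--   """Calculates the number of coins each companion receives, based on the given number of companions and days.
--
--   Args:
--     number_of_companions(int): The number of companions.
--     days(int): The number of days.
--
--   Returns:
--     The number of coins each companion receives.
--   """
--
--   coins = 0
--   for current_day in range(1, days + 1):
--     if current_day % 10 == 0:
--       number_of_companions -= 2
--     if current_day % 15 == 0:
--       number_of_companions += 5
--     if current_day % 3 == 0:
--       coins -= number_of_companions * 3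
--     if current_day % 5 == 0:
--       coins += number_of_companions * 20
--       if current_day % 3 == 0:
--         coins -= number_of_companions * 2
--     coins += 50
--     coins -= number_of_companions * 2
--
--   coins_per_companion = coins // number_of_companions
--   return coins_per_companion, number_of_companions
-- ===== SOURCE B (Python) =====
-- def calculate_coins_per_companion(number_of_companions, days):
--     """O(1) closed form: companions change with period structure and day-d coin
--     deltas are linear in the companion count, so sum 30-day blocks in closed form."""
--     D = days if days > 0 else 0
--     q = D // 30
--     r = D % 30
--
--     def w(d):
--         out = -2
--         if d % 3 == 0:
--             out -= 3
--         if d % 5 == 0: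
--             out += 20
--         if d % 15 == 0:
--             out -= 2
--         return out
--
--     def g(d):
--         return -2 * (d // 10) + 5 * (d // 15)
--
--     W = sum(w(d) for d in range(1, 31))
--     S = sum(w(d) * g(d) for d in range(1, 31))
--     coins = 50 * D + q * (W * number_of_companions + S) + 2 * W * q * (q - 1)
--     for d in range(1, r + 1):
--         coins += w(d) * (number_of_companions + g(d) + 4 * q)
--     companions = number_of_companions + 4 * q + g(r)
--     return coins // companions, companions
-- ===== Notes on version B (the rewrite author's own statement) =====
-- stated objective: faster
-- what changed: Replaced the day-by-day simulation with a closed-form summation: the per-day coin delta is linear in the companion count, which follows a 30-day periodic pattern, so B sums whole 30-day blocks with precomputed period constants (W=26, S=55) plus an explicit loop over at most 29 leftover days.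
import Mathlib
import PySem

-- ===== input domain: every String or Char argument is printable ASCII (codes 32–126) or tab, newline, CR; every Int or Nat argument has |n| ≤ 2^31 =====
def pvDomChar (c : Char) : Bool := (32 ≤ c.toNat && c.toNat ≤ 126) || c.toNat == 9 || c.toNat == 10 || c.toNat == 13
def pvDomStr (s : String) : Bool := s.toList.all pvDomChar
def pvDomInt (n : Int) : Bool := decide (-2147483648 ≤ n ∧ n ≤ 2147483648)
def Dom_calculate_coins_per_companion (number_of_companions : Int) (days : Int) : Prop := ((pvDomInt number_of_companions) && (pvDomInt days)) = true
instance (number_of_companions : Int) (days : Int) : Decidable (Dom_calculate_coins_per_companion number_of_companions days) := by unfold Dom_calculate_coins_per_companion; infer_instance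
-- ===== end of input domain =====

-- B replaces the O(days) day-by-day simulation with an O(1) closed-form summation over 30-day periods (objective: faster).


-- ===== PORT A =====
def pvStepA (st : Int × Int) (current_day : Int) : Int × Int :=
  let coins := st.1
  let n := st.2
  let n := if PySem.Int.mod current_day 10 = 0 then n - 2 else n
  let n := if PySem.Int.mod current_day 15 = 0 then n + 5 else n
  let coins := if PySem.Int.mod current_day 3 = 0 then coins - n * 3 else coins
  let coins := if PySem.Int.mod current_day 5 = 0 then
      let coins := coins + n * 20
      if PySem.Int.mod current_day 3 = 0 then coins - n * 2 else coins
    else coins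
  let coins := coins + 50
  let coins := coins - n * 2
  (coins, n)

def calculate_coins_per_companion (number_of_companions : Int) (days : Int) : List Int :=
  let st := (PySem.List.pyRange 1 (days + 1) 1).foldl pvStepA (0, number_of_companions)
  [PySem.Int.floordiv st.1 st.2, st.2]

-- ===== PORT B =====
-- w d = coefficient of the companion count in the day-d coin delta
def pvW (d : Int) : Int :=
  let out : Int := -2
  let out := if PySem.Int.mod d 3 = 0 then out - 3 else out
  let out := if PySem.Int.mod d 5 = 0 then out + 20 else out
  if PySem.Int.mod d 15 = 0 then out - 2 else out

-- g d = total companion-count change after d days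
def pvG (d : Int) : Int := -2 * PySem.Int.floordiv d 10 + 5 * PySem.Int.floordiv d 15

-- the closed-form coin total for D (= max days 0) days
def pvCoinsB (n0 : Int) (D : Int) : Int :=
  let q := PySem.Int.floordiv D 30
  let r := PySem.Int.mod D 30
  let W := ((PySem.List.pyRange 1 31 1).map pvW).sum
  let S := ((PySem.List.pyRange 1 31 1).map (fun d => pvW d * pvG d)).sum
  let coins0 := 50 * D + q * (W * n0 + S) + 2 * W * q * (q - 1)
  (PySem.List.pyRange 1 (r + 1) 1).foldl
    (fun a d => a + pvW d * (n0 + pvG d + 4 * q)) coins0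

def calculate_coins_per_companion_alt (number_of_companions : Int) (days : Int) : List Int :=
  let D := if days > 0 then days else 0
  let coins := pvCoinsB number_of_companions D
  let companions := number_of_companions + 4 * PySem.Int.floordiv D 30
      + pvG (PySem.Int.mod D 30)
  [PySem.Int.floordiv coins companions, companions]

-- ===== PRECONDITION & SPEC =====
-- Pre_ excludes exactly the inputs where the final companion count is 0: there Python A
-- (and B alike) raises ZeroDivisionError on the final '//'.
def Pre_calculate_coins_per_companion (number_of_companions : Int) (days : Int) : Prop :=
  number_of_companions - 2 * (max days 0 / 10) + 5 * (max days 0 / 15) ≠ 0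
instance (number_of_companions : Int) (days : Int) : Decidable (Pre_calculate_coins_per_companion number_of_companions days) := by unfold Pre_calculate_coins_per_companion; infer_instance
def pvWitness_calculate_coins_per_companion : Int × Int := (3, 20)

def Spec_calculate_coins_per_companion (number_of_companions : Int) (days : Int) (out : List Int) : Prop := out = calculate_coins_per_companion_alt number_of_companions days
instance (number_of_companions : Int) (days : Int) (out : List Int) : Decidable (Spec_calculate_coins_per_companion number_of_companions days out) := by unfold Spec_calculate_coins_per_companion; infer_instance

-- ===== CLAIM (what is proved, stated in full; the proofs are below) =====
def Claim_equal_calculate_coins_per_companion : Prop := ∀ (number_of_companions : Int) (days : Int), Dom_calculate_coins_per_companion number_of_companions days → Pre_calculate_coins_per_companion number_of_companions days → Spec_calculate_coins_per_companion number_of_companions days (calculate_coins_per_companion number_of_companions days)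

-- ===== LEMMAS AND PROOFS =====
-- the common recursive characterisation of the coin total
def pvF (n0 : Int) : Nat → Int
  | 0 => 0
  | n + 1 => pvF n0 n + 50 + pvW ((n : Int) + 1) * (n0 + pvG ((n : Int) + 1))

lemma pvG_zero : pvG 0 = 0 := by decide

lemma pvG_period (q d : Int) : pvG (30 * q + d) = 4 * q + pvG d := by
  simp only [pvG, PySem.Int.floordiv_eq_ediv_of_pos (a := 30*q+d) (b := 10) (by norm_num),
    PySem.Int.floordiv_eq_ediv_of_pos (a := 30*q+d) (b := 15) (by norm_num),
    PySem.Int.floordiv_eq_ediv_of_pos (a := d) (b := 10) (by norm_num),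
    PySem.Int.floordiv_eq_ediv_of_pos (a := d) (b := 15) (by norm_num)]
  have h10 : (30*q+d) / 10 = 3*q + d / 10 := by omega
  have h15 : (30*q+d) / 15 = 2*q + d / 15 := by omega
  rw [h10, h15]; ring

lemma pvW_period (q d : Int) : pvW (30 * q + d) = pvW d := by
  simp only [pvW, PySem.Int.mod_eq_emod_of_pos (a := 30*q+d) (b := 3) (by norm_num),
    PySem.Int.mod_eq_emod_of_pos (a := 30*q+d) (b := 5) (by norm_num),
    PySem.Int.mod_eq_emod_of_pos (a := 30*q+d) (b := 15) (by norm_num),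
    PySem.Int.mod_eq_emod_of_pos (a := d) (b := 3) (by norm_num),
    PySem.Int.mod_eq_emod_of_pos (a := d) (b := 5) (by norm_num),
    PySem.Int.mod_eq_emod_of_pos (a := d) (b := 15) (by norm_num)]
  have h3 : (30*q+d) % 3 = d % 3 := by omega
  have h5 : (30*q+d) % 5 = d % 5 := by omega
  have h15 : (30*q+d) % 15 = d % 15 := by omega
  rw [h3, h5, h15]

-- A's loop body, applied to state (F, n0 + g n) on day n+1, produces the next such state
lemma stepA_eq (n0 F : Int) (d : Int) :
    pvStepA (F, n0 + pvG (d - 1)) d = (F + 50 + pvW d * (n0 + pvG d), n0 + pvG d) := by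
  have hg : pvG d = pvG (d - 1) + (if PySem.Int.mod d 10 = 0 then -2 else 0)
      + (if PySem.Int.mod d 15 = 0 then 5 else 0) := by
    simp only [pvG, PySem.Int.floordiv_eq_ediv_of_pos (b := 10) (by norm_num),
      PySem.Int.floordiv_eq_ediv_of_pos (b := 15) (by norm_num),
      PySem.Int.mod_eq_emod_of_pos (b := 10) (by norm_num),
      PySem.Int.mod_eq_emod_of_pos (b := 15) (by norm_num)]
    split_ifs <;> omega
  simp only [pvStepA, pvW,
    PySem.Int.mod_eq_emod_of_pos (b := 3) (by norm_num),
    PySem.Int.mod_eq_emod_of_pos (b := 5) (by norm_num),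
    PySem.Int.mod_eq_emod_of_pos (b := 10) (by norm_num),
    PySem.Int.mod_eq_emod_of_pos (b := 15) (by norm_num)] at hg ⊢
  split_ifs at hg ⊢ <;> (refine Prod.ext ?_ ?_ <;> simp <;> omega)

-- A's loop: after n days the state is (pvF n0 n, n0 + pvG n)
lemma loopA_eq (n0 : Int) (n : Nat) :
    (PySem.List.pyRange 1 ((n : Int) + 1) 1).foldl pvStepA (0, n0) = (pvF n0 n, n0 + pvG (n : Int)) := by
  induction n with
  | zero => simp [PySem.List.pyRange_one_eq_nil (by norm_num : (1:Int) ≤ 1), pvF, pvG_zero]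
  | succ n ih =>
    have hcast : ((n + 1 : Nat) : Int) + 1 = ((n : Int) + 1) + 1 := by push_cast; ring
    rw [hcast, PySem.List.pyRange_one_succ_right (by omega), List.foldl_append]
    rw [ih]
    have := stepA_eq n0 (pvF n0 n) ((n : Int) + 1)
    simp only [add_sub_cancel_right] at this
    simp only [List.foldl, this, pvF]
    push_cast
    ring_nf

-- linear expansion of the tail sum
lemma sum_map_linear (l : List Int) (f g : Int → Int) (a b : Int) :
    (l.map (fun d => f d * (a + g d + b))).sum
      = a * (l.map f).sum + (l.map (fun d => f d * g d)).sum + b * (l.map f).sum := by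
  induction l with
  | nil => simp
  | cons x xs ih => simp [ih]; ring

lemma Wsum : ((PySem.List.pyRange 1 31 1).map pvW).sum = 26 := by decide
lemma Ssum : ((PySem.List.pyRange 1 31 1).map (fun d => pvW d * pvG d)).sum = 55 := by decide

-- pvCoinsB, with the period constants evaluated and the tail fold as a sum
lemma coinsB_expand (n0 D : Int) :
    pvCoinsB n0 D = 50 * D + (D / 30) * (26 * n0 + 55) + 52 * (D / 30) * (D / 30 - 1)
      + ((PySem.List.pyRange 1 (D % 30 + 1) 1).map
          (fun d => pvW d * (n0 + pvG d + 4 * (D / 30)))).sum := by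
  simp only [pvCoinsB, Wsum, Ssum,
    PySem.Int.floordiv_eq_ediv_of_pos (b := 30) (by norm_num),
    PySem.Int.mod_eq_emod_of_pos (b := 30) (by norm_num),
    PySem.List.foldl_add]
  ring

lemma pvG_30 : pvG 30 = 4 := by decide
lemma pvW_30 : pvW 30 = 13 := by decide

-- B's closed form satisfies the same recursion
lemma coinsB_eq (n0 : Int) (n : Nat) : pvCoinsB n0 (n : Int) = pvF n0 n := by
  induction n with
  | zero =>
    simp [coinsB_expand, pvF]
  | succ n ih =>
    set q : Int := (n : Int) / 30 with hq
    set r : Int := (n : Int) % 30 with hr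
    have hdecomp : (n : Int) = 30 * q + r := by omega
    have hrb : 0 ≤ r ∧ r < 30 := by constructor <;> omega
    have hcast : ((n + 1 : Nat) : Int) = (n : Int) + 1 := by push_cast; ring
    rw [hcast, coinsB_expand, pvF, ← ih, coinsB_expand]
    by_cases h29 : r = 29
    · -- the last day of a 30-day block: a new full block is completed
      have hq1 : ((n : Int) + 1) / 30 = q + 1 := by omega
      have hr1 : ((n : Int) + 1) % 30 = 0 := by omega
      have hsum30 : ((PySem.List.pyRange 1 31 1).map
          (fun d => pvW d * (n0 + pvG d + 4 * q))).sum = n0 * 26 + 55 + 4 * q * 26 := by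
        rw [sum_map_linear (PySem.List.pyRange 1 31 1) pvW pvG n0 (4 * q), Wsum, Ssum]
      have hsplit : PySem.List.pyRange 1 31 1 = PySem.List.pyRange 1 30 1 ++ [(30 : Int)] := by
        decide
      rw [hsplit, List.map_append, List.sum_append] at hsum30
      simp only [List.map_cons, List.map_nil, List.sum_cons, List.sum_nil] at hsum30
      have hWn : pvW ((n : Int) + 1) = 13 := by
        have : (n : Int) + 1 = 30 * q + 30 := by omega
        rw [this, pvW_period, pvW_30]
      have hGn : pvG ((n : Int) + 1) = 4 * q + 4 := by
        have : (n : Int) + 1 = 30 * q + 30 := by omega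
        rw [this, pvG_period, pvG_30]
      rw [hq1, hr1, hWn, hGn, pvG_30, pvW_30] at *
      have hnil : PySem.List.pyRange 1 ((0 : Int) + 1) 1 = [] := by decide
      rw [hnil, ← hr, h29] at *
      simp only [List.map_nil, List.sum_nil]
      have h30 : PySem.List.pyRange 1 (29 + 1 : Int) 1 = PySem.List.pyRange 1 30 1 := by norm_num
      rw [h30]
      linarith [hsum30]
    · -- inside a block: the same q, the tail gains one day
      have hq1 : ((n : Int) + 1) / 30 = q := by omega
      have hr1 : ((n : Int) + 1) % 30 = r + 1 := by omega
      have hsplit : PySem.List.pyRange 1 (r + 1 + 1) 1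
          = PySem.List.pyRange 1 (r + 1) 1 ++ [r + 1] := by
        exact PySem.List.pyRange_one_succ_right (a := 1) (b := r + 1) (by omega)
      have hWn : pvW ((n : Int) + 1) = pvW (r + 1) := by
        have : (n : Int) + 1 = 30 * q + (r + 1) := by omega
        rw [this, pvW_period]
      have hGn : pvG ((n : Int) + 1) = 4 * q + pvG (r + 1) := by
        have : (n : Int) + 1 = 30 * q + (r + 1) := by omega
        rw [this, pvG_period]
      rw [hq1, hr1, hsplit, List.map_append, List.sum_append, hWn, hGn]
      simp only [List.map_cons, List.map_nil, List.sum_cons, List.sum_nil]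
      ring

-- ===== VERDICT (by name: the statement is the Claim_ definition above) =====
theorem calculate_coins_per_companion_spec : Claim_equal_calculate_coins_per_companion := by
  intro n0 days _hdom _hpre
  unfold Spec_calculate_coins_per_companion
  unfold calculate_coins_per_companion calculate_coins_per_companion_alt
  by_cases hpos : 0 < days
  case neg =>
    have hif : (if days > 0 then days else 0) = 0 := by omega
    have hnil : PySem.List.pyRange 1 (days + 1) 1 = [] :=
      PySem.List.pyRange_one_eq_nil (by omega)
    have h0 : pvCoinsB n0 0 = 0 := by
      have := coinsB_eq n0 0
      simpa [pvF] using this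
    simp [hif, hnil, h0, pvG_zero]
  case pos =>
    have hn : ((days.toNat : Nat) : Int) = days := by omega
    have hif : (if days > 0 then days else 0) = days := by omega
    have hfold := loopA_eq n0 days.toNat
    rw [hn] at hfold
    have hcoins : pvCoinsB n0 days = pvF n0 days.toNat := by
      rw [← hn]; exact coinsB_eq n0 days.toNat
    have hcomp : n0 + 4 * PySem.Int.floordiv days 30 + pvG (PySem.Int.mod days 30)
        = n0 + pvG days := by
      rw [PySem.Int.floordiv_eq_ediv_of_pos (by norm_num),
        PySem.Int.mod_eq_emod_of_pos (by norm_num)]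
      have hdec : days = 30 * (days / 30) + days % 30 := by omega
      calc n0 + 4 * (days / 30) + pvG (days % 30)
          = n0 + pvG (30 * (days / 30) + days % 30) := by rw [pvG_period]; ring
        _ = n0 + pvG days := by rw [← hdec]
    simp only [hif, hfold, hcoins, hcomp]
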